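-- pv_equiv track=rewrite | github.com/jmeppley/jupy_tools | jme/jupy_tools/hit_tables.py | decode_sam_flags
-- ===== SOURCE A (Python) =====
-- bit_names = [
--     'paired', 'mapped in pair', 'unmapped', 'mate unmapped',
--     'read rev strand', 'mate rev strand',
--     'first in pair', 'second in pair', 'not primary alig', 'fails checks',
--     'duplicate', 'supplementary',
-- ]
--
-- def decode_sam_flags(flag):
--     # hack using the binary representation of the flag integer
--     # I couldn't get it to pad zeros properly, so I'm adding a high bit that I cut off at the end
--     bits = list(reversed(f"{bin(int(flag) + 4096)}"))[:-3]
--     assert len(bits) == len(bit_names)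
--     return {
--         name: (bit == "1")
--         for name, bit
--         in zip(bit_names, bits)
--     }
-- ===== SOURCE B (Python) =====
-- bit_names = [
--     'paired', 'mapped in pair', 'unmapped', 'mate unmapped',
--     'read rev strand', 'mate rev strand',
--     'first in pair', 'second in pair', 'not primary alig', 'fails checks',
--     'duplicate', 'supplementary',
-- ]
--
-- def decode_sam_flags(flag):
--     # greedy binary decomposition: peel off the largest flag value first,
--     # walking the names from the highest bit down with a running remainder,
--     # then reverse the collected items back into bit order
--     rem = int(flag) % 4096
--     items = []
--     threshold = 2048
--     for name in reversed(bit_names):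
--         if rem >= threshold:
--             items.append((name, True))
--             rem -= threshold
--         else:
--             items.append((name, False))
--         threshold //= 2
--     return dict(reversed(items))
-- ===== Notes on version B (the rewrite author's own statement) =====
-- stated objective: alternative
-- what changed: B decodes by greedy binary decomposition: it walks the names from the highest flag value down with a running remainder, subtracting each power of two it finds and reversing the collected items back into bit order, instead of A's building bin(flag+4096) as a string, reversing it and slicing off the '0b' padding hack.
-- intended difference: For -8191 <= flag <= -6145 (where bin(flag+4096) is negative with exactly 12 binary digits) A accidentally returns the bit pattern of |flag+4096|, while B returns the standard low-12-bits (flag mod 4096) decoding, the value a SAM-flag decoder is meant to give; at flag = -6144 the two coincide. — e.g. on decode_sam_flags(-8191): A returns [("paired", true), ("mapped in pair", true), ("unmapped", true), ("mate unmapped", true), ("read rev strand", true), ("…, B returns [("paired", true), ("mapped in pair", false), ("unmapped", false), ("mate unmapped", false), ("read rev strand", false)…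
import Mathlib
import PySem

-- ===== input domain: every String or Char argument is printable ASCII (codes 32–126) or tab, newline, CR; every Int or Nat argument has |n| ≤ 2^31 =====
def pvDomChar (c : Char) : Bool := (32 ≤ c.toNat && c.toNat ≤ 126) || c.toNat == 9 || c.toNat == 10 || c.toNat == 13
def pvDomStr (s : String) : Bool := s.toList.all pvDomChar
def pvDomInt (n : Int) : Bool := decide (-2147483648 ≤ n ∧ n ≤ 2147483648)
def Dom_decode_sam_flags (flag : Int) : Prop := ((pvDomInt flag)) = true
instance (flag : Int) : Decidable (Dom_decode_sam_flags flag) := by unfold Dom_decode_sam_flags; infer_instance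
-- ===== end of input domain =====

-- B decodes by greedy binary decomposition: it walks the names from the highest flag
-- value down with a running remainder, subtracting each power of two it finds, and
-- reverses the collected items back into bit order — instead of A's reversed
-- bin(flag+4096) string hack (objective: alternative); equal on all valid flags
-- 0..4095; on the accidental negative band where A also returns (D_ below) B gives
-- the intended low-12-bits (mod 4096) decoding.

-- ===== PORT A =====
def bit_names : List String := [
  "paired", "mapped in pair", "unmapped", "mate unmapped",
  "read rev strand", "mate rev strand",
  "first in pair", "second in pair", "not primary alig", "fails checks",
  "duplicate", "supplementary"]

-- bits = list(reversed(bin(int(flag)+4096)))[:-3]; assert len(bits) == len(bit_names);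
-- then the dict {name: bit == "1" for name, bit in zip(bit_names, bits)}.
-- The dict keys (bit_names) are distinct, so the dict is the zipped association list.
-- Where the assert fails Python raises; the port returns [] there (excluded by Pre_).
def decode_sam_flags (flag : Int) : List (String × Bool) :=
  let bits := PySem.List.slice ((PySem.Int.toBinChars0b (flag + 4096)).reverse) none (some (-3))
  if bits.length = bit_names.length then
    (bit_names.zip bits).map (fun p => (p.1, p.2 == '1'))
  else []

-- ===== PORT B =====
-- The body of B's for-loop: given (items, rem, threshold) and the next name,
-- append (name, rem >= threshold), subtract threshold when set, halve threshold.
def decode_step (st : (List (String × Bool)) × Int × Int) (name : String) :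
    (List (String × Bool)) × Int × Int :=
  let items := st.1
  let rem := st.2.1
  let threshold := st.2.2
  if threshold ≤ rem then
    (items ++ [(name, true)], rem - threshold, PySem.Int.floordiv threshold 2)
  else
    (items ++ [(name, false)], rem, PySem.Int.floordiv threshold 2)

-- rem = int(flag) % 4096; items = []; threshold = 2048;
-- for name in reversed(bit_names): decode_step; return dict(reversed(items)).
-- The keys (bit_names) are distinct, so dict(reversed(items)) is items reversed.
def decode_sam_flags_alt (flag : Int) : List (String × Bool) :=
  (bit_names.reverse.foldl decode_step ([], PySem.Int.mod flag 4096, 2048)).1.reverse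

-- ===== PRECONDITION & SPEC =====
-- Pre_ admits exactly the inputs on which A returns (everywhere else A raises
-- AssertionError: the reversed-binary-string slice has the wrong length): the valid
-- flags 0..4095, plus the accidental band -8191..-6144 where bin(flag+4096) is
-- negative with exactly 12 binary digits.
def Pre_decode_sam_flags (flag : Int) : Prop :=
  (0 ≤ flag ∧ flag ≤ 4095) ∨ (-8191 ≤ flag ∧ flag ≤ -6144)
instance (flag : Int) : Decidable (Pre_decode_sam_flags flag) := by
  unfold Pre_decode_sam_flags; infer_instance

def pvWitness_decode_sam_flags : Int := (99)

-- For -8191 ≤ flag ≤ -6145 A returns the bit pattern of |flag+4096| (an accident of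
-- reversing the '-0b…' string of a negative number), while B returns the standard
-- low-12-bits (mod 4096) decoding of flag, the value a SAM-flag decoder is meant to
-- give; at flag = -6144 the two coincide, so it stays in the proved-equal region.
def D_decode_sam_flags (flag : Int) : Prop := -8191 ≤ flag ∧ flag ≤ -6145
instance (flag : Int) : Decidable (D_decode_sam_flags flag) := by
  unfold D_decode_sam_flags; infer_instance

def pvDiffWitness_decode_sam_flags : Int := (-8191)
def pvDiffWitnessOut_decode_sam_flags : (List (String × Bool)) × (List (String × Bool)) :=
  ([("paired", true), ("mapped in pair", true), ("unmapped", true), ("mate unmapped", true), ("read rev strand", true), ("mate rev strand", true), ("first in pair", true), ("second in pair", true), ("not primary alig", true), ("fails checks", true), ("duplicate", true), ("supplementary", true)],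
   [("paired", true), ("mapped in pair", false), ("unmapped", false), ("mate unmapped", false), ("read rev strand", false), ("mate rev strand", false), ("first in pair", false), ("second in pair", false), ("not primary alig", false), ("fails checks", false), ("duplicate", false), ("supplementary", false)])

def Spec_decode_sam_flags (flag : Int) (out : List (String × Bool)) : Prop :=
  ¬ D_decode_sam_flags flag → out = decode_sam_flags_alt flag
instance (flag : Int) (out : List (String × Bool)) : Decidable (Spec_decode_sam_flags flag out) := by
  unfold Spec_decode_sam_flags; infer_instance

-- ===== CLAIM (what is proved, stated in full; the proofs are below) =====
def Claim_unchanged_decode_sam_flags : Prop := ∀ (flag : Int), Dom_decode_sam_flags flag →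
  Pre_decode_sam_flags flag → Spec_decode_sam_flags flag (decode_sam_flags flag)
def Claim_changed_decode_sam_flags : Prop :=
  Dom_decode_sam_flags (pvDiffWitness_decode_sam_flags) ∧
  Pre_decode_sam_flags (pvDiffWitness_decode_sam_flags) ∧
  D_decode_sam_flags (pvDiffWitness_decode_sam_flags) ∧
  decode_sam_flags (pvDiffWitness_decode_sam_flags) = pvDiffWitnessOut_decode_sam_flags.1 ∧
  decode_sam_flags_alt (pvDiffWitness_decode_sam_flags) = pvDiffWitnessOut_decode_sam_flags.2 ∧
  pvDiffWitnessOut_decode_sam_flags.1 ≠ pvDiffWitnessOut_decode_sam_flags.2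
def Claim_exact_decode_sam_flags : Prop := ∀ (flag : Int), Dom_decode_sam_flags flag →
  Pre_decode_sam_flags flag → D_decode_sam_flags flag →
  decode_sam_flags flag ≠ decode_sam_flags_alt flag

-- ===== LEMMAS AND PROOFS =====
-- A-SIDE: the binary digits of m, least significant first, as Python's bin() prints
-- them (read back to front). Characterises Nat.toDigits 2, which backs toBinChars0b.
def lsbChars : Nat → List Char
  | m => Nat.digitChar (m % 2) :: (if h : m / 2 = 0 then [] else lsbChars (m / 2))
decreasing_by exact Nat.div_lt_self (Nat.pos_of_ne_zero (by omega)) one_lt_two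

theorem lsbChars_eq (m : Nat) :
    lsbChars m = Nat.digitChar (m % 2) :: (if m / 2 = 0 then [] else lsbChars (m / 2)) := by
  rw [lsbChars]
  by_cases h : m / 2 = 0 <;> simp [h]

theorem toDigitsCore_eq_lsb : ∀ (f n : Nat) (ds : List Char), n < f →
    Nat.toDigitsCore 2 f n ds = (lsbChars n).reverse ++ ds := by
  intro f
  induction f with
  | zero => intro n ds h; omega
  | succ f ih =>
    intro n ds h
    rw [Nat.toDigitsCore]
    by_cases h2 : n / 2 = 0
    · rw [lsbChars_eq]
      simp [h2]
    · simp only [h2, if_false]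
      rw [ih (n / 2) _ (by omega)]
      conv_rhs => rw [lsbChars_eq n]
      simp [h2]

theorem toDigits_two_rev (m : Nat) : (Nat.toDigits 2 m).reverse = lsbChars m := by
  unfold Nat.toDigits
  rw [toDigitsCore_eq_lsb (m + 1) m [] (by omega)]
  simp

theorem lsb_getElem? : ∀ (j m : Nat), j < (lsbChars m).length →
    (lsbChars m)[j]? = some (Nat.digitChar (m / 2 ^ j % 2)) := by
  intro j
  induction j with
  | zero => intro m h; rw [lsbChars_eq m]; simp
  | succ j ih =>
    intro m h
    rw [lsbChars_eq m] at h ⊢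
    by_cases h2 : m / 2 = 0
    · simp [h2] at h
    · simp only [h2, if_false] at h ⊢
      simp only [List.getElem?_cons_succ]
      rw [ih (m / 2) (by simpa using h)]
      congr 2
      rw [Nat.div_div_eq_div_mul]
      ring_nf

theorem lsb_length : ∀ (k : Nat), ∀ m, 2 ^ k ≤ m → m < 2 ^ (k + 1) → (lsbChars m).length = k + 1 := by
  intro k
  induction k with
  | zero => intro m h1 h2; interval_cases m; rw [lsbChars_eq]; simp
  | succ k ih =>
    intro m h1 h2
    have hp : (0:Nat) < 2 ^ k := Nat.two_pow_pos k
    have e1 : (2:Nat) ^ (k+1) = 2 * 2 ^ k := by ring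
    have e2 : (2:Nat) ^ (k+2) = 2 * 2 ^ (k+1) := by ring
    have hd1 : 2 ^ k ≤ m / 2 := by omega
    have hd2 : m / 2 < 2 ^ (k + 1) := by omega
    have h2ne : m / 2 ≠ 0 := by omega
    rw [lsbChars_eq]
    simp [h2ne, ih (m / 2) hd1 hd2]

-- B-SIDE: the items B's loop collects, written as a recursion: the bit for the
-- current (highest remaining) threshold 2^k, then the rest on the new remainder.
def greedyBits : Nat → Int → List String → List (String × Bool)
  | _, _, [] => []
  | k, r, name :: rest =>
      (name, decide ((2:Int) ^ k ≤ r)) ::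
        greedyBits (k - 1) (if (2:Int) ^ k ≤ r then r - 2 ^ k else r) rest

-- B's foldl with starting threshold 2^(|l|-1) collects exactly greedyBits.
theorem foldl_decode_step : ∀ (l : List String) (k : Nat) (acc : List (String × Bool))
    (r : Int), l.length = k + 1 →
    (l.foldl decode_step (acc, r, ((2:Int) ^ k))).1 = acc ++ greedyBits k r l := by
  intro l
  induction l with
  | nil => intro k acc r hlen; simp at hlen
  | cons name rest ih =>
    intro k acc r hlen
    cases rest with
    | nil =>
      have hk : k = 0 := by simpa using hlen
      subst hk
      by_cases h : (1:Int) ≤ r <;>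
        simp [List.foldl, decode_step, greedyBits, pow_zero, h]
    | cons b t =>
      have hk1 : 1 ≤ k := by simp at hlen; omega
      obtain ⟨k', rfl⟩ : ∃ k', k = k' + 1 := ⟨k - 1, by omega⟩
      have hrest : (b :: t).length = k' + 1 := by simpa using hlen
      rw [List.foldl_cons]
      by_cases h : (2:Int) ^ (k' + 1) ≤ r
      · have hstep : decode_step (acc, r, (2:Int) ^ (k' + 1)) name
            = (acc ++ [(name, true)], r - 2 ^ (k' + 1), (2:Int) ^ k') := by
          simp [decode_step, h]
          rw [pow_succ]
          exact Int.mul_ediv_cancel _ (by norm_num)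
        rw [hstep, ih k' (acc ++ [(name, true)]) (r - 2 ^ (k' + 1)) hrest]
        simp [greedyBits, h]
      · have hstep : decode_step (acc, r, (2:Int) ^ (k' + 1)) name
            = (acc ++ [(name, false)], r, (2:Int) ^ k') := by
          simp [decode_step, h]
          rw [pow_succ]
          exact Int.mul_ediv_cancel _ (by norm_num)
        rw [hstep, ih k' (acc ++ [(name, false)]) r hrest]
        simp [greedyBits, h]

theorem greedy_length : ∀ (l : List String) (k : Nat) (r : Int),
    (greedyBits k r l).length = l.length := by
  intro l
  induction l with
  | nil => intro k r; simp [greedyBits]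
  | cons name rest ih => intro k r; simp [greedyBits, ih]

-- Each collected item is the binary digit of r at the matching power of two.
theorem greedy_getElem? : ∀ (l : List String) (i k : Nat) (r : Int),
    l.length = k + 1 → i < l.length → 0 ≤ r → r < 2 ^ (k + 1) →
    (greedyBits k r l)[i]? =
      (l[i]?.map (fun nm => (nm, decide (r / (2:Int) ^ (k - i) % 2 = 1)))) := by
  intro l
  induction l with
  | nil => intro i k r hlen hi; simp at hi
  | cons name rest ih =>
    intro i k r hlen hi h0 h1
    cases i with
    | zero =>
      simp only [greedyBits, List.getElem?_cons_zero, Option.map_some, Nat.sub_zero]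
      congr 2
      have hppos : (0:Int) < (2:Int) ^ k := by positivity
      have h2p : (2:Int) ^ (k + 1) = 2 * 2 ^ k := by rw [pow_succ]; ring
      by_cases hle : (2:Int) ^ k ≤ r
      · have hq : r / (2:Int) ^ k = 1 := by
          rw [← PySem.Int.floordiv_eq_ediv_of_pos hppos,
            PySem.Int.floordiv_eq_iff_of_pos hppos]
          constructor <;> linarith
        simp [hle, hq]
      · have hq : r / (2:Int) ^ k = 0 := Int.ediv_eq_zero_of_lt h0 (not_le.mp hle)
        simp [hle, hq]
    | succ i' =>
      have hrl : rest.length = k := by simpa using hlen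
      have hi' : i' < rest.length := by simp at hi; omega
      have hk1 : 1 ≤ k := by omega
      obtain ⟨k', rfl⟩ : ∃ k', k = k' + 1 := ⟨k - 1, by omega⟩
      have h2p : (2:Int) ^ (k' + 1 + 1) = 2 * 2 ^ (k' + 1) := by rw [pow_succ]; ring
      set r' : Int := if (2:Int) ^ (k' + 1) ≤ r then r - 2 ^ (k' + 1) else r with hr'
      have h0' : 0 ≤ r' := by rw [hr']; split <;> linarith
      have h1' : r' < 2 ^ (k' + 1) := by
        rw [hr']; split
        · linarith
        · linarith [not_le.mp (by assumption : ¬ (2:Int) ^ (k' + 1) ≤ r)]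
      have hrec := ih i' k' r' (by omega) hi' h0' h1'
      simp only [greedyBits, List.getElem?_cons_succ, Nat.add_sub_cancel, ← hr']
      rw [hrec]
      have hm : k' + 1 - (i' + 1) = k' - i' := by omega
      rw [hm]
      have hdigit : r' / (2:Int) ^ (k' - i') % 2 = r / (2:Int) ^ (k' - i') % 2 := by
        rw [hr']
        split
        · set m : Nat := k' - i' with hmm
          have hsplit : (2:Int) ^ (k' + 1) = (2 * 2 ^ (i' : Nat)) * 2 ^ m := by
            rw [← pow_succ', ← pow_add]
            congr 1
            omega
          have hsub : r - (2:Int) ^ (k' + 1) = r + (-(2 * 2 ^ (i' : Nat))) * 2 ^ m := by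
            rw [hsplit]; ring
          rw [hsub, Int.add_mul_ediv_right _ _ (by positivity : (0:Int) < (2:Int) ^ m).ne']
          have : r / (2:Int) ^ m + -(2 * 2 ^ (i' : Nat))
              = r / (2:Int) ^ m + 2 * (-(2 ^ (i' : Nat))) := by ring
          rw [this, Int.add_mul_emod_self_left]
        · rfl
      rw [hdigit]

-- B's result, before the valid-range analysis: the reversed greedy item list.
theorem alt_eq_greedy (flag : Int) :
    decode_sam_flags_alt flag
      = (greedyBits 11 (PySem.Int.mod flag 4096) bit_names.reverse).reverse := by
  rw [decode_sam_flags_alt,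
    show (2048:Int) = (2:Int) ^ 11 by norm_num,
    foldl_decode_step bit_names.reverse 11 [] (PySem.Int.mod flag 4096) (by decide)]
  simp

-- A = B on every valid flag 0..4095, via the two digit characterisations above.
theorem decode_eq_on_valid (flag : Int) (h0 : 0 ≤ flag) (h1 : flag ≤ 4095) :
    decode_sam_flags flag = decode_sam_flags_alt flag := by
  set n : Nat := flag.toNat with hn
  have hflag : flag = (n : Int) := by omega
  have hnlt : n < 4096 := by omega
  set m : Nat := n + 4096 with hm
  have hmt : (flag + 4096).toNat = m := by omega
  have hneg : ¬ (flag + 4096 < 0) := by omega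
  have hlen : (lsbChars m).length = 13 := lsb_length 12 m (by omega) (by norm_num; omega)
  have hbits : PySem.List.slice ((PySem.Int.toBinChars0b (flag + 4096)).reverse) none (some (-3))
      = (lsbChars m).take 12 := by
    rw [PySem.Int.toBinChars0b]
    simp only [hneg, if_false, hmt]
    rw [PySem.List.slice_to_neg_ofNat _ 3 (by omega)]
    have : ('0' :: 'b' :: Nat.toDigits 2 m).reverse = (lsbChars m) ++ ['b', '0'] := by
      simp [toDigits_two_rev]
    rw [this]
    simp [hlen, List.take_append]
  have hmod : PySem.Int.mod flag 4096 = flag := by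
    rw [PySem.Int.mod_eq_emod_of_pos (by norm_num)]
    exact Int.emod_eq_of_lt h0 (by omega)
  rw [decode_sam_flags, alt_eq_greedy, hmod]
  simp only [hbits]
  have hlen12 : ((lsbChars m).take 12).length = 12 := by simp [hlen]
  rw [if_pos (by simp [hlen12, bit_names])]
  have hbn : bit_names.length = 12 := by decide
  have hrevlen : bit_names.reverse.length = 12 := by decide
  have hglen : (greedyBits 11 flag bit_names.reverse).length = 12 := by
    rw [greedy_length, hrevlen]
  apply List.ext_getElem
  · simp [hbn, hlen12, hglen]
  · intro j hj1 hj2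
    simp only [List.length_map, List.length_zip, hbn, hlen12, Nat.min_self] at hj1
    have hjb : j < bit_names.length := by omega
    have hjl : j < (lsbChars m).length := by omega
    -- A side entry
    simp only [List.getElem_map, List.getElem_zip]
    have hb : ((lsbChars m).take 12)[j] = Nat.digitChar (m / 2 ^ j % 2) := by
      have hsome := lsb_getElem? j m hjl
      have : ((lsbChars m).take 12)[j]? = (lsbChars m)[j]? := List.getElem?_take_of_lt (by omega)
      rw [hsome] at this
      exact Option.some_injective _ (by rw [← this, List.getElem?_eq_getElem])
    rw [hb]
    have hmn : m / 2 ^ j % 2 = n / 2 ^ j % 2 := by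
      have hsplit : (4096 : Nat) = 2 ^ j * 2 ^ (12 - j) := by
        rw [← pow_add, show j + (12 - j) = 12 by omega]
        norm_num
      rw [hm, hsplit, Nat.add_mul_div_left _ _ (Nat.two_pow_pos j)]
      have h2 : 2 ^ (12 - j) = 2 * 2 ^ (11 - j) := by
        rw [← pow_succ']
        congr 1
        omega
      rw [h2, Nat.add_mul_mod_self_left]
    rw [hmn]
    -- B side entry
    have hcast : flag / (2:Int) ^ j % 2 = ((n / 2 ^ j % 2 : Nat) : Int) := by
      rw [hflag]
      push_cast
      rfl
    symm
    rw [List.getElem_reverse]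
    refine (List.getElem_eq_iff (by rw [hglen]; omega)).mpr ?_
    rw [show (greedyBits 11 flag bit_names.reverse).length - 1 - j = 11 - j by
      rw [hglen]]
    rw [greedy_getElem? bit_names.reverse (11 - j) 11 flag (by decide)
      (by rw [hrevlen]; omega) h0 (by norm_num; omega)]
    rw [List.getElem?_reverse (by rw [hbn]; omega)]
    rw [show bit_names.length - 1 - (11 - j) = j by rw [hbn]; omega]
    rw [List.getElem?_eq_getElem hjb]
    simp only [Option.map_some]
    rw [show 11 - (11 - j) = j by omega, hcast]
    have hd2 : n / 2 ^ j % 2 = 0 ∨ n / 2 ^ j % 2 = 1 := by omega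
    rcases hd2 with h | h <;> rw [h] <;> rfl

-- A ≠ B everywhere on D_: there A's binary string is that of -(flag+4096), whose
-- top bit is set, so A's 'supplementary' entry is true, while B's remainder
-- flag % 4096 = flag + 8192 < 2048 makes its 'supplementary' entry false.
theorem decode_ne_on_band (flag : Int) (h0 : -8191 ≤ flag) (h1 : flag ≤ -6145) :
    decode_sam_flags flag ≠ decode_sam_flags_alt flag := by
  set m' : Nat := (-(flag + 4096)).toNat with hm'
  have hm1 : 2049 ≤ m' := by omega
  have hm2 : m' ≤ 4095 := by omega
  have hneg : flag + 4096 < 0 := by omega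
  have habs : (flag + 4096).natAbs = m' := by omega
  have hlen : (lsbChars m').length = 12 := by
    have := lsb_length 11 m' (by norm_num; omega) (by norm_num; omega)
    simpa using this
  have hbits : PySem.List.slice ((PySem.Int.toBinChars0b (flag + 4096)).reverse) none (some (-3))
      = lsbChars m' := by
    rw [PySem.Int.toBinChars0b]
    simp only [if_pos hneg, habs]
    rw [PySem.List.slice_to_neg_ofNat _ 3 (by omega)]
    have : ('-' :: '0' :: 'b' :: Nat.toDigits 2 m').reverse
        = (lsbChars m') ++ ['b', '0', '-'] := by
      simp [toDigits_two_rev]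
    rw [this]
    simp [hlen]
  have hA : (decode_sam_flags flag)[11]? = some ("supplementary", true) := by
    rw [decode_sam_flags]
    simp only [hbits]
    rw [if_pos (by rw [hlen]; decide)]
    have h11 : 11 < (bit_names.zip (lsbChars m')).length := by
      simp [hlen, bit_names]
    rw [List.getElem?_map, List.getElem?_eq_getElem h11, List.getElem_zip]
    have hc : (lsbChars m')[11]'(by omega) = Nat.digitChar (m' / 2 ^ 11 % 2) := by
      rw [List.getElem_eq_iff]
      exact lsb_getElem? 11 m' (by omega)
    have hd : m' / 2 ^ 11 % 2 = 1 := by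
      rw [show (2:Nat) ^ 11 = 2048 by norm_num]
      omega
    rw [hc, hd]
    rfl
  have hmod : PySem.Int.mod flag 4096 = flag + 8192 := by
    rw [PySem.Int.mod_eq_emod_of_pos (by norm_num)]
    omega
  have hB : (decode_sam_flags_alt flag)[11]? = some ("supplementary", false) := by
    rw [alt_eq_greedy, hmod]
    have hglen' : (greedyBits 11 (flag + 8192) bit_names.reverse).length = 12 := by
      rw [greedy_length]
      decide
    rw [List.getElem?_reverse (by rw [hglen']; omega)]
    rw [show (greedyBits 11 (flag + 8192) bit_names.reverse).length - 1 - 11 = 0 by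
      rw [hglen']]
    rw [show bit_names.reverse = "supplementary" :: ["duplicate", "fails checks",
      "not primary alig", "second in pair", "first in pair", "mate rev strand",
      "read rev strand", "mate unmapped", "unmapped", "mapped in pair", "paired"]
      from by decide]
    rw [greedyBits]
    rw [List.getElem?_cons_zero]
    have : decide ((2:Int) ^ 11 ≤ flag + 8192) = false := by
      rw [show (2:Int) ^ 11 = 2048 by norm_num]
      simp
      omega
    rw [this]
  intro heq
  rw [heq, hB] at hA
  simp at hA

-- ===== VERDICT (by name: the statements are the Claim_ definitions above) =====
theorem decode_sam_flags_spec : Claim_unchanged_decode_sam_flags := by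
  intro flag _ hpre
  unfold Spec_decode_sam_flags
  intro hnd
  unfold Pre_decode_sam_flags at hpre
  unfold D_decode_sam_flags at hnd
  rcases hpre with ⟨h0, h1⟩ | hband
  · exact decode_eq_on_valid flag h0 h1
  · have : flag = -6144 := by omega
    rw [this]
    decide

theorem decode_sam_flags_changed : Claim_changed_decode_sam_flags := by
  unfold Claim_changed_decode_sam_flags
  decide

theorem decode_sam_flags_tight : Claim_exact_decode_sam_flags := by
  intro flag _ _ hd
  unfold D_decode_sam_flags at hd
  exact decode_ne_on_band flag hd.1 hd.2
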